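-- pv_equiv track=rewrite | github.com/idqdq/nexus_scrapli_netconf_lab | tpl_evpn_xml.py | xpath2xml
-- ===== SOURCE A (Python) =====
-- def xpath2xml(xpath, xmlns=''):
--
--     pl = xpath.split('/')
--
--     xmls = f'<{pl[1]} xmlns="{xmlns}">'
--     xmle = f'</{pl[1]}>'
--
--     def _xpath2xml(pl):
--         key = ''
--         xmls = ''
--         xmle = ''
--
--         for i in range(len(pl)):
--             elem = pl[i]
--             if "=" in elem:
--                 elem,key = elem.split("=")
--                 xmls += f'<{elem}>{key}</{elem}>'
--                 break
--             xmls += f'<{elem}>'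
--             xmle = f'</{elem}>' + xmle
--
--         if key and i < len(pl)-1:
--             return xmls + _xpath2xml(pl[(i+1)::]) + xmle #recursion
--         else:
--             return xmls + xmle
--
--     return xmls + _xpath2xml(pl[2::]) + xmle
-- ===== SOURCE B (Python) =====
-- def xpath2xml(xpath, xmlns=''):
--     # Single pass with a pending-close-tag stack instead of A's break+recursion;
--     # the loop stops for good at a leaf whose value is empty, as A does.
--     pl = xpath.split('/')
--     root = pl[1]
--     out = []
--     closes = []
--     for seg in pl[2:]:
--         if '=' in seg:
--             elem, val = seg.split('=')
--             out.append(f'<{elem}>{val}</{elem}>')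
--             if not val:
--                 break
--         else:
--             out.append(f'<{seg}>')
--             closes.append(f'</{seg}>')
--     return f'<{root} xmlns="{xmlns}">' + ''.join(out) + ''.join(reversed(closes)) + f'</{root}>'
-- ===== Notes on version B (the rewrite author's own statement) =====
-- stated objective: simpler
-- what changed: Replaces A's break-out-of-the-loop plus recursion on the remaining segments (with per-level close-tag accumulation) by a single loop over the segments after the root that appends tags to one output buffer and pushes closing tags on one stack emitted in reverse at the end.
import Mathlib
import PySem

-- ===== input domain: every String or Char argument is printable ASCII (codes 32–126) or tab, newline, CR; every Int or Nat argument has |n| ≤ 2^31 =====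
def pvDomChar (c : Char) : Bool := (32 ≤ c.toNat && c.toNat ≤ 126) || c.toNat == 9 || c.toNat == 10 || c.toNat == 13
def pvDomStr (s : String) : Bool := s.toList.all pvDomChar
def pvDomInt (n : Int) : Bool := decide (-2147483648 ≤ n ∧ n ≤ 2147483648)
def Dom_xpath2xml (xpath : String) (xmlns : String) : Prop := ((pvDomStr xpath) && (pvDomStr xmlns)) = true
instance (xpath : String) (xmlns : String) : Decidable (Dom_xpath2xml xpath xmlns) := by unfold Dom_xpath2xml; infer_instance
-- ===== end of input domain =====

-- B replaces A's break-out-of-the-loop plus recursion on the remaining segments by one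
-- pass with a pending-close-tag stack (objective: simpler).

-- ===== PORT A =====
-- the body of A's for-loop over the inner pl (with the break): returns
-- (xmls, xmle, key, segments after the break index); where Python would raise
-- ValueError on 'elem,key = elem.split("=")' (a segment with ≥ 2 '='s, excluded
-- by Pre_ when reached) the port stops with the accumulators gathered so far.
def aLoop : List (List Char) → List Char → List Char → List Char × List Char × List Char × List (List Char)
  | [], xs, xe => (xs, xe, [], [])
  | e :: rest, xs, xe =>
    if PySem.Chars.isIn ['='] e then
      match PySem.Chars.splitOn e ['='] with
      | [el, k] => (xs ++ ('<' :: el ++ '>' :: k ++ ('<' :: '/' :: el ++ ['>'])), xe, k, rest)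
      | _ => (xs, xe, [], [])   -- Python: ValueError on unpacking; excluded by Pre_
    else aLoop rest (xs ++ ('<' :: e ++ ['>'])) (('<' :: '/' :: e ++ ['>']) ++ xe)

-- the break position is inside the list, so the remaining-segments component shrinks
theorem aLoop_rest (pl : List (List Char)) (xs xe : List Char) :
    (aLoop pl xs xe).2.2.2.length < pl.length ∨ (aLoop pl xs xe).2.2.2 = [] := by
  induction pl generalizing xs xe with
  | nil => right; rfl
  | cons e rest ih =>
    by_cases hin : PySem.Chars.isIn ['='] e
    · cases hsp : PySem.Chars.splitOn e ['='] with
      | nil => right; simp [aLoop, hin, hsp]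
      | cons el tl =>
        cases tl with
        | nil => right; simp [aLoop, hin, hsp]
        | cons k tl2 =>
          cases tl2 with
          | nil => left; simp [aLoop, hin, hsp]
          | cons z tl3 => right; simp [aLoop, hin, hsp]
    · have := ih (xs ++ ('<' :: e ++ ['>'])) (('<' :: '/' :: e ++ ['>']) ++ xe)
      rcases this with h | h
      · left; simpa [aLoop, hin] using Nat.lt_succ_of_lt h
      · right; simpa [aLoop, hin] using h

-- A's inner recursive helper _xpath2xml
def aInner (pl : List (List Char)) : List Char :=
  if h : (aLoop pl [] []).2.2.1 ≠ [] ∧ (aLoop pl [] []).2.2.2 ≠ [] then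
    (aLoop pl [] []).1 ++ aInner (aLoop pl [] []).2.2.2 ++ (aLoop pl [] []).2.1
  else
    (aLoop pl [] []).1 ++ (aLoop pl [] []).2.1
termination_by pl.length
decreasing_by
  rcases aLoop_rest pl [] [] with hlt | hnil
  · exact hlt
  · exact absurd hnil h.2

def xpath2xml (xpath : String) (xmlns : String) : String :=
  let pl := PySem.Chars.splitOn xpath.toList ['/']
  match PySem.List.pyGet? pl 1 with
  | none => ""   -- Python: IndexError on pl[1] (xpath without '/'); excluded by Pre_
  | some h =>
    String.ofList (('<' :: h ++ (" xmlns=\"".toList) ++ xmlns.toList ++ ['"', '>'])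
      ++ aInner (PySem.List.slice pl (some 2) none)
      ++ ('<' :: '/' :: h ++ ['>']))

-- ===== PORT B =====
-- B's single loop over pl[2:]: output buffer plus a stack of pending close tags;
-- the loop breaks for good at a leaf whose value is empty (as the Python B does).
def bLoop : List (List Char) → List (List Char) → List (List Char) → List (List Char) × List (List Char)
  | [], out, closes => (out, closes)
  | seg :: rest, out, closes =>
    if PySem.Chars.isIn ['='] seg then
      match PySem.Chars.splitOn seg ['='] with
      | [el, v] =>
        if v = [] then (out ++ [('<' :: el ++ '>' :: v ++ ('<' :: '/' :: el ++ ['>']))], closes)  -- break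
        else bLoop rest (out ++ [('<' :: el ++ '>' :: v ++ ('<' :: '/' :: el ++ ['>']))]) closes
      | _ => (out, closes)   -- Python: ValueError on unpacking; excluded by Pre_ when reached
    else bLoop rest (out ++ [('<' :: seg ++ ['>'])]) (closes ++ [('<' :: '/' :: seg ++ ['>'])])

def xpath2xml_alt (xpath : String) (xmlns : String) : String :=
  let pl := PySem.Chars.splitOn xpath.toList ['/']
  match PySem.List.pyGet? pl 1 with
  | none => ""   -- Python: IndexError on pl[1]; excluded by Pre_
  | some root =>
    let t := bLoop (PySem.List.slice pl (some 2) none) [] []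
    String.ofList (('<' :: root ++ (" xmlns=\"".toList) ++ xmlns.toList ++ ['"', '>'])
      ++ PySem.Chars.join [] t.1 ++ PySem.Chars.join [] t.2.reverse
      ++ ('<' :: '/' :: root ++ ['>']))

-- ===== PRECONDITION & SPEC =====
-- Pre_ holds exactly where Python A returns: the xpath contains a '/' (else IndexError
-- on pl[1]), and every segment after the root with two or more '='s is never reached,
-- i.e. some earlier segment is a leaf with an empty value, which stops A's scan
-- (otherwise ValueError from the tuple-unpacked split); B stops at the same leaf.
def Pre_xpath2xml (xpath : String) (xmlns : String) : Prop :=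
  2 ≤ (PySem.Chars.splitOn xpath.toList ['/']).length ∧
  ∀ i < (PySem.List.slice (PySem.Chars.splitOn xpath.toList ['/']) (some 2) none).length,
    2 < (PySem.Chars.splitOn ((PySem.List.slice (PySem.Chars.splitOn xpath.toList ['/']) (some 2) none).getD i []) ['=']).length →
    ∃ j < i,
      (PySem.Chars.splitOn ((PySem.List.slice (PySem.Chars.splitOn xpath.toList ['/']) (some 2) none).getD j []) ['=']).length = 2 ∧
      (PySem.Chars.splitOn ((PySem.List.slice (PySem.Chars.splitOn xpath.toList ['/']) (some 2) none).getD j []) ['=']).getLast? = some []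
instance (xpath : String) (xmlns : String) : Decidable (Pre_xpath2xml xpath xmlns) := by
  unfold Pre_xpath2xml; infer_instance

def pvWitness_xpath2xml : String × String := ("/interfaces/interface/name=eth0/mtu", "urn:ns")

def Spec_xpath2xml (xpath : String) (xmlns : String) (out : String) : Prop := out = xpath2xml_alt xpath xmlns
instance (xpath : String) (xmlns : String) (out : String) : Decidable (Spec_xpath2xml xpath xmlns out) := by
  unfold Spec_xpath2xml; infer_instance

-- ===== CLAIM (what is proved, stated in full; the proofs are below) =====
def Claim_equal_xpath2xml : Prop := ∀ (xpath : String) (xmlns : String), Dom_xpath2xml xpath xmlns → Pre_xpath2xml xpath xmlns → Spec_xpath2xml xpath xmlns (xpath2xml xpath xmlns)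

-- ===== LEMMAS AND PROOFS =====

-- the rendering B's wrapper applies to the bLoop result
def bRender (pl : List (List Char)) : List Char :=
  PySem.Chars.join [] (bLoop pl [] []).1 ++ PySem.Chars.join [] (bLoop pl [] []).2.reverse

theorem join_nil_eq_flatten (l : List (List Char)) : PySem.Chars.join [] l = l.flatten := by
  induction l with
  | nil => simp [PySem.Chars.join_nil]
  | cons a t ih =>
    cases t with
    | nil => simp [PySem.Chars.join_singleton]
    | cons b t2 => rw [PySem.Chars.join_cons_cons]; simp [ih]

theorem aLoop_acc (pl : List (List Char)) (xs xe : List Char) :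
    aLoop pl xs xe = (xs ++ (aLoop pl [] []).1, (aLoop pl [] []).2.1 ++ xe, (aLoop pl [] []).2.2) := by
  induction pl generalizing xs xe with
  | nil => simp [aLoop]
  | cons e rest ih =>
    by_cases hin : PySem.Chars.isIn ['='] e = true
    · cases hsp : PySem.Chars.splitOn e ['='] with
      | nil => simp [aLoop, hin, hsp]
      | cons el tl =>
        cases tl with
        | nil => simp [aLoop, hin, hsp]
        | cons k tl2 =>
          cases tl2 with
          | nil => simp [aLoop, hin, hsp]
          | cons z tl3 => simp [aLoop, hin, hsp]
    · have h1 := ih (xs ++ ('<' :: e ++ ['>'])) (('<' :: '/' :: e ++ ['>']) ++ xe)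
      have h2 := ih ('<' :: e ++ ['>']) ('<' :: '/' :: e ++ ['>'])
      simp only [aLoop, hin, if_neg, Bool.false_eq_true, not_false_iff,
        List.nil_append, List.append_nil] at *
      rw [h1, h2]
      simp [List.append_assoc]

theorem bLoop_acc (pl out closes : List (List Char)) :
    bLoop pl out closes = (out ++ (bLoop pl [] []).1, closes ++ (bLoop pl [] []).2) := by
  induction pl generalizing out closes with
  | nil => simp [bLoop]
  | cons e rest ih =>
    by_cases hin : PySem.Chars.isIn ['='] e = true
    · cases hsp : PySem.Chars.splitOn e ['='] with
      | nil => simp [bLoop, hin, hsp]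
      | cons el tl =>
        cases tl with
        | nil => simp [bLoop, hin, hsp]
        | cons v tl2 =>
          cases tl2 with
          | nil =>
            by_cases hv : v = []
            · simp [bLoop, hin, hsp, hv]
            · have h1 := ih (out ++ [('<' :: el ++ '>' :: v ++ ('<' :: '/' :: el ++ ['>']))]) closes
              have h2 := ih [('<' :: el ++ '>' :: v ++ ('<' :: '/' :: el ++ ['>']))] ([] : List (List Char))
              simp only [bLoop, hin, hsp, hv, ite_false, if_neg, List.nil_append, List.append_nil] at *
              rw [h1, h2]
              simp [List.append_assoc]
          | cons z tl3 => simp [bLoop, hin, hsp]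
    · have h1 := ih (out ++ [('<' :: e ++ ['>'])]) (closes ++ [('<' :: '/' :: e ++ ['>'])])
      have h2 := ih [('<' :: e ++ ['>'])] [('<' :: '/' :: e ++ ['>'])]
      simp only [bLoop, hin, Bool.false_eq_true, not_false_iff,
        List.nil_append] at *
      rw [h1, h2]
      simp [List.append_assoc]

theorem bRender_nil : bRender [] = [] := by
  simp [bRender, bLoop, join_nil_eq_flatten]

theorem aInner_nil : aInner [] = [] := by
  rw [aInner]; simp [aLoop]

-- one loop step of A on a container segment opens a tag around the rest
theorem aInner_cons_open (e : List Char) (rest : List (List Char))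
    (hin : PySem.Chars.isIn ['='] e = false) :
    aInner (e :: rest) = ('<' :: e ++ ['>']) ++ aInner rest ++ ('<' :: '/' :: e ++ ['>']) := by
  have hL : aLoop (e :: rest) [] [] =
      (('<' :: e ++ ['>']) ++ (aLoop rest [] []).1,
       (aLoop rest [] []).2.1 ++ ('<' :: '/' :: e ++ ['>']),
       (aLoop rest [] []).2.2) := by
    have h2 := aLoop_acc rest ('<' :: e ++ ['>']) ('<' :: '/' :: e ++ ['>'])
    simp only [aLoop, hin, Bool.false_eq_true, not_false_iff, ite_false,
      List.nil_append, List.append_nil] at *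
    rw [h2]
  have hrest_eq : aInner rest =
      if h : (aLoop rest [] []).2.2.1 ≠ [] ∧ (aLoop rest [] []).2.2.2 ≠ [] then
        (aLoop rest [] []).1 ++ aInner (aLoop rest [] []).2.2.2 ++ (aLoop rest [] []).2.1
      else (aLoop rest [] []).1 ++ (aLoop rest [] []).2.1 := by
    rw [aInner]
  rw [aInner, hL, hrest_eq]
  by_cases hc : (aLoop rest [] []).2.2.1 ≠ [] ∧ (aLoop rest [] []).2.2.2 ≠ []
  · rw [dif_pos hc, dif_pos hc]; simp [List.append_assoc]
  · rw [dif_neg hc, dif_neg hc]; simp [List.append_assoc]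

-- one loop step of A on a leaf segment (the break), with the key test afterwards
theorem aInner_cons_leaf (e el v : List Char) (rest : List (List Char))
    (hin : PySem.Chars.isIn ['='] e = true)
    (hsp : PySem.Chars.splitOn e ['='] = [el, v]) :
    aInner (e :: rest) = ('<' :: el ++ '>' :: v ++ ('<' :: '/' :: el ++ ['>'])) ++
      (if v ≠ [] ∧ rest ≠ [] then aInner rest else []) := by
  have hL : aLoop (e :: rest) [] [] =
      (('<' :: el ++ '>' :: v ++ ('<' :: '/' :: el ++ ['>'])), [], v, rest) := by
    simp [aLoop, hin, hsp]
  rw [aInner, hL]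
  by_cases hc : v ≠ [] ∧ rest ≠ []
  · rw [dif_pos hc, if_pos hc]; simp
  · rw [dif_neg hc, if_neg hc]

theorem bRender_cons_open (e : List Char) (rest : List (List Char))
    (hin : PySem.Chars.isIn ['='] e = false) :
    bRender (e :: rest) = ('<' :: e ++ ['>']) ++ bRender rest ++ ('<' :: '/' :: e ++ ['>']) := by
  have hBL : bLoop (e :: rest) [] [] =
      ([('<' :: e ++ ['>'])] ++ (bLoop rest [] []).1,
       [('<' :: '/' :: e ++ ['>'])] ++ (bLoop rest [] []).2) := by
    have h2 := bLoop_acc rest [('<' :: e ++ ['>'])] [('<' :: '/' :: e ++ ['>'])]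
    simp only [bLoop, hin, Bool.false_eq_true, not_false_iff, ite_false,
      List.nil_append] at *
    rw [h2]
  unfold bRender
  rw [hBL]
  simp [join_nil_eq_flatten, List.append_assoc]

-- one loop step of B on a leaf with a nonempty value: continue
theorem bRender_cons_leaf (e el v : List Char) (rest : List (List Char))
    (hin : PySem.Chars.isIn ['='] e = true)
    (hsp : PySem.Chars.splitOn e ['='] = [el, v]) (hv : v ≠ []) :
    bRender (e :: rest) = ('<' :: el ++ '>' :: v ++ ('<' :: '/' :: el ++ ['>'])) ++ bRender rest := by
  have hBL : bLoop (e :: rest) [] [] =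
      ([('<' :: el ++ '>' :: v ++ ('<' :: '/' :: el ++ ['>']))] ++ (bLoop rest [] []).1,
       (bLoop rest [] []).2) := by
    rw [show bLoop (e :: rest) [] [] =
        bLoop rest [('<' :: el ++ '>' :: v ++ ('<' :: '/' :: el ++ ['>']))] [] from by
      simp [bLoop, hin, hsp, hv]]
    rw [bLoop_acc rest _ _]
    simp
  unfold bRender
  rw [hBL]
  simp [join_nil_eq_flatten, List.append_assoc]

-- one loop step of B on a leaf with an empty value: break
theorem bRender_cons_break (e el : List Char) (rest : List (List Char))
    (hin : PySem.Chars.isIn ['='] e = true)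
    (hsp : PySem.Chars.splitOn e ['='] = [el, []]) :
    bRender (e :: rest) = ('<' :: el ++ '>' :: ('<' :: '/' :: el ++ ['>'])) := by
  have hBL : bLoop (e :: rest) [] [] =
      ([('<' :: el ++ '>' :: ('<' :: '/' :: el ++ ['>']))], []) := by
    simp [bLoop, hin, hsp]
  unfold bRender
  rw [hBL]
  simp [join_nil_eq_flatten]

-- the two renderings agree on every segment list (at a multi-'=' segment both ports
-- stop with the prefix gathered so far, so no side condition is needed here)
theorem aInner_eq_bRender (pl : List (List Char)) : aInner pl = bRender pl := by
  induction pl with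
  | nil => rw [aInner_nil, bRender_nil]
  | cons e rest ih =>
    by_cases hin : PySem.Chars.isIn ['='] e = true
    · cases hsp : PySem.Chars.splitOn e ['='] with
      | nil =>
        rw [aInner]
        simp [aLoop, hin, hsp, bRender, bLoop, join_nil_eq_flatten]
      | cons el tl =>
        cases tl with
        | nil =>
          rw [aInner]
          simp [aLoop, hin, hsp, bRender, bLoop, join_nil_eq_flatten]
        | cons v tl2 =>
          cases tl2 with
          | nil =>
            by_cases hv : v = []
            · subst hv
              rw [aInner_cons_leaf e el [] rest hin hsp, bRender_cons_break e el rest hin hsp]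
              rw [if_neg (by simp)]
              simp
            · rw [aInner_cons_leaf e el v rest hin hsp, bRender_cons_leaf e el v rest hin hsp hv]
              cases rest with
              | nil => simp [aInner_nil, bRender_nil]
              | cons y ys => rw [if_pos ⟨hv, by simp⟩, ih]
          | cons z tl3 =>
            rw [aInner]
            simp [aLoop, hin, hsp, bRender, bLoop, join_nil_eq_flatten]
    · have hinf : PySem.Chars.isIn ['='] e = false := by rwa [Bool.not_eq_true] at hin
      rw [aInner_cons_open e rest hinf, bRender_cons_open e rest hinf, ih]

-- ===== VERDICT (by name: the statement is the Claim_ definition above) =====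
theorem xpath2xml_spec : Claim_equal_xpath2xml := by
  intro xpath xmlns _hdom hpre
  unfold Spec_xpath2xml
  obtain ⟨hlen, _⟩ := hpre
  unfold xpath2xml xpath2xml_alt
  dsimp only
  rw [PySem.List.pyGet?_eq_some_getElem (PySem.Chars.splitOn xpath.toList ['/']) (i := 1)
    (by norm_num)
    (by exact_mod_cast (by omega : 1 < (PySem.Chars.splitOn xpath.toList ['/']).length))]
  dsimp only
  rw [aInner_eq_bRender]
  unfold bRender
  simp [List.append_assoc]
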